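-- pv_equiv track=rewrite | github.com/thetocha/python_practice | lab4.py | str_raise
-- ===== SOURCE A (Python) =====
-- def str_raise(string):
--     x = string.split()
--     raise_flag = True
--     for world in x:
--         for i in range(len(world) - 1):
--             if world[i] >= world[i + 1]:
--                 raise_flag = False
--         if raise_flag:
--             return world
--         raise_flag = True
--     return None
-- ===== SOURCE B (Python) =====
-- def str_raise(string):
--     for word in string.split():
--         if list(word) == sorted(word) and len(set(word)) == len(word):
--             return word
--     return None
-- ===== Notes on version B (the rewrite author's own statement) =====
-- stated objective: idiomatic
-- what changed: The per-word adjacent-pair index scan with a reset flag is replaced by a sort-and-set characterisation: a word's characters are strictly increasing iff the word equals its sorted copy and its characters are all distinct (len(set(word)) == len(word)).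
import Mathlib
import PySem

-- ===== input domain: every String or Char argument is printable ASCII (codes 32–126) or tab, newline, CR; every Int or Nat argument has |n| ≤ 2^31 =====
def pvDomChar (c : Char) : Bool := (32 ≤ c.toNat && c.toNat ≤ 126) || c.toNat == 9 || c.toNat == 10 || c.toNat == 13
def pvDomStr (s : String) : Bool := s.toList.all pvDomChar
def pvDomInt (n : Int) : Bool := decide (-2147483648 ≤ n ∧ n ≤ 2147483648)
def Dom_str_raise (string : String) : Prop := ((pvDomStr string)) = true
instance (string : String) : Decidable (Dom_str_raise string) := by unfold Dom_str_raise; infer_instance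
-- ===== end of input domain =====

-- B replaces A's per-word adjacent-pair flag scan by the idiomatic sort-and-distinct test
-- (word == sorted(word) and all characters distinct); the outer first-match search is kept.


-- ===== PORT A =====
-- inner loop: for i in range(len(world) - 1): if world[i] >= world[i + 1]: raise_flag = False
-- (pyGetD is exact here: every index i and i+1 drawn from range(len-1) is in range)
def pvInnerA (w : List Char) : Bool :=
  (PySem.List.pyRange 0 ((w.length : Int) - 1)).foldl
    (fun flag i =>
      if PySem.List.pyGetD w i ' ' ≥ PySem.List.pyGetD w (i + 1) ' ' then false else flag)
    true

-- outer loop: first word whose inner scan left raise_flag true (flag is reset per word)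
def pvLoopA : List String → Option String
  | [] => none
  | w :: ws => if pvInnerA w.toList then some w else pvLoopA ws

def str_raise (string : String) : Option String :=
  pvLoopA (PySem.Str.split₀ string)

-- ===== PORT B =====
-- list(word) == sorted(word) and len(set(word)) == len(word)
def pvOkB (w : String) : Bool :=
  (w.toList == PySem.List.sorted w.toList (fun c => c)) &&
  ((PySem.Set.ofList w.toList).length == w.toList.length)

def pvLoopB : List String → Option String
  | [] => none
  | w :: ws => if pvOkB w then some w else pvLoopB ws

def str_raise_alt (string : String) : Option String :=
  pvLoopB (PySem.Str.split₀ string)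

-- ===== PRECONDITION & SPEC =====
def Spec_str_raise (string : String) (out : Option String) : Prop := out = str_raise_alt string
instance (string : String) (out : Option String) : Decidable (Spec_str_raise string out) := by unfold Spec_str_raise; infer_instance

-- ===== CLAIM (what is proved, stated in full; the proofs are below) =====
def Claim_equal_str_raise : Prop := ∀ (string : String), Dom_str_raise string → Spec_str_raise string (str_raise string)

-- ===== LEMMAS AND PROOFS =====

-- a flag that only ever flips to false: the fold is an 'all'
theorem pv_foldl_flag (P : Int → Prop) [DecidablePred P] (r : List Int) (b : Bool) :
    r.foldl (fun flag i => if P i then false else flag) b = (b && r.all (fun i => !decide (P i))) := by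
  induction r generalizing b with
  | nil => simp
  | cons i r ih =>
    simp only [List.foldl_cons, List.all_cons]
    rw [ih]
    by_cases h : P i <;> simp [h]

-- ofList keeps a subsequence (first occurrences)
theorem pv_ofList_sublist {α : Type} [BEq α] [LawfulBEq α] (l : List α) :
    (PySem.Set.ofList l).Sublist l := by
  induction l with
  | nil => simp [PySem.Set.ofList_nil]
  | cons x xs ih =>
    rw [PySem.Set.ofList_cons]
    exact List.Sublist.cons₂ x (List.Sublist.trans (List.filter_sublist) ih)

theorem pv_len_ofList_iff_nodup {α : Type} [BEq α] [LawfulBEq α] (l : List α) :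
    (PySem.Set.ofList l).length = l.length ↔ l.Nodup := by
  constructor
  · intro h
    have := (pv_ofList_sublist l).eq_of_length h
    rw [← this]
    exact PySem.Set.nodup_ofList l
  · intro h
    rw [PySem.Set.ofList_eq_self_of_nodup l h]

-- A's inner scan decides strict increase of adjacent characters
theorem pv_innerA_eq (w : List Char) :
    pvInnerA w = decide (w.Pairwise (· < ·)) := by
  rw [pvInnerA, pv_foldl_flag, Bool.true_and]
  rcases h : decide (w.Pairwise (· < ·)) with _ | _
  · -- not pairwise: some adjacent pair violates
    have hnp : ¬ w.Pairwise (· < ·) := by simpa using h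
    have hnc : ¬ List.IsChain (· < ·) w := fun hc => hnp (List.isChain_iff_pairwise.mp hc)
    rw [List.isChain_iff_getElem] at hnc
    push Not at hnc
    obtain ⟨i, hi, hge⟩ := hnc
    apply List.all_eq_false.mpr
    refine ⟨(i : Int), PySem.List.mem_pyRange_one.mpr ⟨by positivity, by omega⟩, ?_⟩
    have h1 : PySem.List.pyGetD w (i : Int) ' ' = w[i] := by
      rw [PySem.List.pyGetD_of_nonneg w ' ' (by positivity)]
      simp [List.getD_eq_getElem?_getD, List.getElem?_eq_getElem (show i < w.length by omega)]
    have h2 : PySem.List.pyGetD w ((i : Int) + 1) ' ' = w[i + 1] := by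
      have : ((i : Int) + 1) = ((i + 1 : Nat) : Int) := by push_cast; ring
      rw [this, PySem.List.pyGetD_of_nonneg w ' ' (by positivity)]
      simp [List.getD_eq_getElem?_getD, List.getElem?_eq_getElem hi]
    simp only [h1, h2]
    simpa using hge
  · -- pairwise: every adjacent pair is fine
    have hp : w.Pairwise (· < ·) := by simpa using h
    have hc := List.isChain_iff_getElem.mp (List.isChain_iff_pairwise.mpr hp)
    apply List.all_eq_true.mpr
    intro i hi
    obtain ⟨h0, hlt⟩ := PySem.List.mem_pyRange_one.mp hi
    have hnlen : i.toNat + 1 < w.length := by omega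
    have h1 : PySem.List.pyGetD w i ' ' = w[i.toNat] := by
      rw [PySem.List.pyGetD_of_nonneg w ' ' h0]
      simp [List.getD_eq_getElem?_getD, List.getElem?_eq_getElem (show i.toNat < w.length by omega)]
    have h2 : PySem.List.pyGetD w (i + 1) ' ' = w[i.toNat + 1] := by
      have he : i + 1 = ((i.toNat + 1 : Nat) : Int) := by omega
      rw [he, PySem.List.pyGetD_of_nonneg w ' ' (by positivity), Int.toNat_natCast]
      simp [List.getD_eq_getElem?_getD, List.getElem?_eq_getElem hnlen]
    simp only [h1, h2]
    simp [not_le.mpr (hc i.toNat hnlen)]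

-- B's sort-and-distinct test decides the same predicate
theorem pv_okB_eq (w : String) :
    pvOkB w = decide (w.toList.Pairwise (· < ·)) := by
  rw [pvOkB]
  rcases h : decide (w.toList.Pairwise (· < ·)) with _ | _
  · have hnp : ¬ w.toList.Pairwise (· < ·) := by simpa using h
    apply Bool.and_eq_false_iff.mpr
    by_cases hs : w.toList = PySem.List.sorted w.toList (fun c => c)
    · right
      have hle : w.toList.Pairwise (· ≤ ·) := by
        have := PySem.List.sorted_pairwise w.toList (fun c => c)
        rw [← hs] at this
        exact this
      have hnd : ¬ w.toList.Nodup := by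
        intro hnd
        exact hnp ((hle.and hnd).imp (fun ⟨hab, hne⟩ => lt_of_le_of_ne hab hne))
      apply beq_eq_false_iff_ne.mpr
      intro hlen
      exact hnd ((pv_len_ofList_iff_nodup _).mp hlen)
    · left; exact beq_eq_false_iff_ne.mpr hs
  · have hp : w.toList.Pairwise (· < ·) := by simpa using h
    have hle : w.toList.Pairwise (· ≤ ·) := hp.imp le_of_lt
    have hnd : w.toList.Nodup := hp.imp ne_of_lt
    apply Bool.and_eq_true_iff.mpr
    constructor
    · exact beq_iff_eq.mpr (PySem.List.sorted_eq_self_of_pairwise w.toList (fun c => c) hle).symm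
    · exact beq_iff_eq.mpr ((pv_len_ofList_iff_nodup _).mpr hnd)

theorem pv_loops_eq (ws : List String) : pvLoopA ws = pvLoopB ws := by
  induction ws with
  | nil => rfl
  | cons w ws ih =>
    rw [pvLoopA, pvLoopB, pv_innerA_eq, pv_okB_eq, ih]

-- ===== VERDICT (by name: the statement is the Claim_ definition above) =====
theorem str_raise_spec : Claim_equal_str_raise := by
  intro s _
  unfold Spec_str_raise str_raise str_raise_alt
  exact pv_loops_eq _
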